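-- pv_equiv track=rewrite | github.com/martaverfer/final_project | utils/functions.py | assign_genre_from_keywords
-- ===== SOURCE A (Python) =====
-- genre_keywords = {
--     'Fiction': ['novel', 'story', 'thriller', 'romance', 'mystery', 'narrative', 'fantasy', 'fiction'],
--     'Non-Fiction': ['biography', 'memoir', 'self-help', 'life', 'true', 'religion', 'cooking', 'sports', 'travel', 'body', 'fitness', 'relationships', 'music', 'criticism', 'philosophy'],
--     'Academic': ['research', 'study', 'academic', 'analysis', 'paper', 'theory', 'history', 'economics', 'computers', 'science', 'education', 'art', 'medical', 'psychology'],
--     "Children's/Young Adult": ['children', 'young', 'teen', 'kid', 'juvenile'],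
--     'Poetry/Drama': ['poem', 'poetry', 'drama', 'play', 'verse']
-- }
--
-- def extract_keywords(text):
--     """
--     Split text into tokens and return a set of unique tokens.
--     """
--     return set(text.split())
--
-- def assign_genre_from_keywords(text):
--     """
--     Assign a genre to the text based on keyword matching.
--     """
--     text_keywords = extract_keywords(text)
--     genre_scores = {}
--
--     for genre, keywords in genre_keywords.items():
--         match_count = len(set(keywords) & text_keywords)
--         genre_scores[genre] = match_count
--
--     if genre_scores:
--         best_genre = max(genre_scores, key=genre_scores.get)
--         if genre_scores[best_genre] > 0:
--             return best_genre
--     return 'Unknown'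
-- ===== SOURCE B (Python) =====
-- genre_keywords = {
--     'Fiction': ['novel', 'story', 'thriller', 'romance', 'mystery', 'narrative', 'fantasy', 'fiction'],
--     'Non-Fiction': ['biography', 'memoir', 'self-help', 'life', 'true', 'religion', 'cooking', 'sports', 'travel', 'body', 'fitness', 'relationships', 'music', 'criticism', 'philosophy'],
--     'Academic': ['research', 'study', 'academic', 'analysis', 'paper', 'theory', 'history', 'economics', 'computers', 'science', 'education', 'art', 'medical', 'psychology'],
--     "Children's/Young Adult": ['children', 'young', 'teen', 'kid', 'juvenile'],
--     'Poetry/Drama': ['poem', 'poetry', 'drama', 'play', 'verse']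
-- }
--
-- # inverted index built once: keyword -> its genre
-- _keyword_to_genre = {kw: g for g, kws in genre_keywords.items() for kw in kws}
--
-- def assign_genre_from_keywords(text):
--     """
--     Assign a genre to the text based on keyword matching.
--     """
--     scores = {g: 0 for g in genre_keywords}
--     for token in set(text.split()):
--         genre = _keyword_to_genre.get(token)
--         if genre is not None:
--             scores[genre] += 1
--     best = max(scores, key=scores.get)
--     return best if scores[best] > 0 else 'Unknown'
-- ===== Notes on version B (the rewrite author's own statement) =====
-- stated objective: idiomatic
-- what changed: Replaces A's per-genre set-intersection loop by an inverted index (keyword -> genre) built once plus a single counting pass over the distinct tokens, scores pre-seeded in genre order so tie-breaking and the no-match case are identical.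
import Mathlib
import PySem

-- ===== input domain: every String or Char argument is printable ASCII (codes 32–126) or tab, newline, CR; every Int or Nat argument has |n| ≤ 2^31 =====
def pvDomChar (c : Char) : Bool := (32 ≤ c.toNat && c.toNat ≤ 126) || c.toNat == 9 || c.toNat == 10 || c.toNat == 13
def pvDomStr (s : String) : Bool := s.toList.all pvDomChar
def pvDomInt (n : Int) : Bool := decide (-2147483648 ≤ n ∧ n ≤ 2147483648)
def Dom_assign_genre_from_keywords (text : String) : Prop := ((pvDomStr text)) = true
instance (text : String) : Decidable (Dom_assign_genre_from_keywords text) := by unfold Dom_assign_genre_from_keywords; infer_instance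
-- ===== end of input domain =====

-- B replaces A's per-genre set intersections by one inverted index (keyword → genre) and a single
-- counting pass over the distinct tokens; objective: idiomatic/alternative.

-- ===== PORT A =====
def genreKeywords : List (String × List String) :=
  [("Fiction", ["novel", "story", "thriller", "romance", "mystery", "narrative", "fantasy", "fiction"]),
   ("Non-Fiction", ["biography", "memoir", "self-help", "life", "true", "religion", "cooking", "sports", "travel", "body", "fitness", "relationships", "music", "criticism", "philosophy"]),
   ("Academic", ["research", "study", "academic", "analysis", "paper", "theory", "history", "economics", "computers", "science", "education", "art", "medical", "psychology"]),
   ("Children's/Young Adult", ["children", "young", "teen", "kid", "juvenile"]),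
   ("Poetry/Drama", ["poem", "poetry", "drama", "play", "verse"])]

-- extract_keywords(text) = set(text.split())
def extractKeywords (text : String) : PySem.Set String :=
  PySem.Set.ofList (PySem.Str.split₀ text)

def assign_genre_from_keywords (text : String) : String :=
  let text_keywords : PySem.Set String := extractKeywords text
  let genre_scores : PySem.Dict String Int :=
    genreKeywords.foldl
      (fun d p => d.insert p.1 ((PySem.Set.inter (PySem.Set.ofList p.2) text_keywords).length : Int))
      PySem.Dict.empty
  -- 'if genre_scores:' — truthiness of a dict is nonemptiness; max(d, key=d.get) is the first
  -- key of maximal value (PySem.List.max? over the keys); the 'none' arm is unreachable under the guard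
  if genre_scores.size ≠ 0 then
    match PySem.List.max? genre_scores.keys (fun k => genre_scores.getD k 0) with
    | some best_genre => if genre_scores.getD best_genre 0 > 0 then best_genre else "Unknown"
    | none => "Unknown"
  else "Unknown"

-- ===== PORT B =====
-- _keyword_to_genre = {kw: g for g, kws in genre_keywords.items() for kw in kws}
def keywordToGenre : PySem.Dict String String :=
  PySem.Dict.ofList (genreKeywords.flatMap (fun p => p.2.map (fun kw => (kw, p.1))))

def assign_genre_from_keywords_alt (text : String) : String :=
  let scores0 : PySem.Dict String Int :=
    genreKeywords.foldl (fun d p => d.insert p.1 0) PySem.Dict.empty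
  -- single pass over the distinct tokens (result is independent of the set's iteration order)
  let scores : PySem.Dict String Int :=
    (PySem.Set.ofList (PySem.Str.split₀ text)).foldl
      (fun d tok =>
        match keywordToGenre.get? tok with
        | some g => d.modify g 0 (· + 1)
        | none => d)
      scores0
  match PySem.List.max? scores.keys (fun k => scores.getD k 0) with
  | some best => if scores.getD best 0 > 0 then best else "Unknown"
  | none => "Unknown"

-- ===== PRECONDITION & SPEC =====
def Spec_assign_genre_from_keywords (text : String) (out : String) : Prop := out = assign_genre_from_keywords_alt text
instance (text : String) (out : String) : Decidable (Spec_assign_genre_from_keywords text out) := by unfold Spec_assign_genre_from_keywords; infer_instance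

-- ===== CLAIM (what is proved, stated in full; the proofs are below) =====
def Claim_equal_assign_genre_from_keywords : Prop := ∀ (text : String), Dom_assign_genre_from_keywords text → Spec_assign_genre_from_keywords text (assign_genre_from_keywords text)

-- ===== LEMMAS AND PROOFS =====

set_option maxRecDepth 8192 in
theorem keywordToGenre_keys_nodup : keywordToGenre.keys.Nodup := by decide
set_option maxRecDepth 8192 in
theorem keywordToGenre_items : keywordToGenre.items =
  [("novel", "Fiction"),
   ("story", "Fiction"),
   ("thriller", "Fiction"),
   ("romance", "Fiction"),
   ("mystery", "Fiction"),
   ("narrative", "Fiction"),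
   ("fantasy", "Fiction"),
   ("fiction", "Fiction"),
   ("biography", "Non-Fiction"),
   ("memoir", "Non-Fiction"),
   ("self-help", "Non-Fiction"),
   ("life", "Non-Fiction"),
   ("true", "Non-Fiction"),
   ("religion", "Non-Fiction"),
   ("cooking", "Non-Fiction"),
   ("sports", "Non-Fiction"),
   ("travel", "Non-Fiction"),
   ("body", "Non-Fiction"),
   ("fitness", "Non-Fiction"),
   ("relationships", "Non-Fiction"),
   ("music", "Non-Fiction"),
   ("criticism", "Non-Fiction"),
   ("philosophy", "Non-Fiction"),
   ("research", "Academic"),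
   ("study", "Academic"),
   ("academic", "Academic"),
   ("analysis", "Academic"),
   ("paper", "Academic"),
   ("theory", "Academic"),
   ("history", "Academic"),
   ("economics", "Academic"),
   ("computers", "Academic"),
   ("science", "Academic"),
   ("education", "Academic"),
   ("art", "Academic"),
   ("medical", "Academic"),
   ("psychology", "Academic"),
   ("children", "Children's/Young Adult"),
   ("young", "Children's/Young Adult"),
   ("teen", "Children's/Young Adult"),
   ("kid", "Children's/Young Adult"),
   ("juvenile", "Children's/Young Adult"),
   ("poem", "Poetry/Drama"),
   ("poetry", "Poetry/Drama"),
   ("drama", "Poetry/Drama"),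
   ("play", "Poetry/Drama"),
   ("verse", "Poetry/Drama")] := by decide
theorem lookup_iff (g : String) (K : List String) (hg : (g, K) ∈ genreKeywords) (t : String) :
    keywordToGenre.get? t = some g ↔ t ∈ K := by
  rw [PySem.Dict.get?_eq_some_iff_mem_items _ _ _ keywordToGenre_keys_nodup, keywordToGenre_items]
  fin_cases hg <;> simp [List.mem_cons, Prod.mk.injEq]
def bStep (d : PySem.Dict String Int) (tok : String) : PySem.Dict String Int :=
  match keywordToGenre.get? tok with
  | some g => d.modify g 0 (· + 1)
  | none => d

theorem bFold_keys_getD (S : List String) (d : PySem.Dict String Int)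
    (h : ∀ g ∈ keywordToGenre.values, g ∈ d.keys) :
    (S.foldl bStep d).keys = d.keys ∧
      ∀ g, (S.foldl bStep d).getD g 0 =
        d.getD g 0 + (S.countP (fun t => keywordToGenre.get? t == some g) : Int) := by
  induction S generalizing d with
  | nil => simp
  | cons t S ih =>
    rw [List.foldl_cons]
    cases hg : keywordToGenre.get? t with
    | none =>
      have hb : bStep d t = d := by unfold bStep; rw [hg]
      rw [hb]
      refine ⟨(ih d h).1, fun g => ?_⟩
      rw [(ih d h).2 g, List.countP_cons]
      simp [hg]
    | some g0 =>
      have hb : bStep d t = d.modify g0 0 (· + 1) := by unfold bStep; rw [hg]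
      have hg0mem : g0 ∈ d.keys := by
        apply h
        have hmem := PySem.Dict.mem_items_of_get?_eq_some _ hg
        simp only [PySem.Dict.values]
        exact List.mem_map.mpr ⟨(t, g0), hmem, rfl⟩
      have hkeys : (d.modify g0 0 (· + 1)).keys = d.keys := by
        rw [PySem.Dict.keys_modify]
        exact PySem.Dict.keys_insert_of_contains _ _ ((PySem.Dict.contains_iff_mem_keys _ _).mpr hg0mem)
      have h' : ∀ g ∈ keywordToGenre.values, g ∈ (d.modify g0 0 (· + 1)).keys := by
        rw [hkeys]; exact h
      obtain ⟨ihk, ihg⟩ := ih _ h'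
      refine ⟨by rw [hb, ihk, hkeys], fun g => ?_⟩
      rw [hb, ihg g, PySem.Dict.getD_modify, List.countP_cons]
      by_cases hgg : g = g0
      · subst hgg
        simp only [hg, beq_self_eq_true, if_true]
        push_cast; ring
      · simp only [hg, if_neg hgg]
        have : (some g0 == some g) = false := by
          simp; exact fun hx => hgg hx.symm
        simp [this]
theorem filter_mem_comm (l1 l2 : List String) (h1 : l1.Nodup) (h2 : l2.Nodup) :
    (l1.filter (fun x => decide (x ∈ l2))).length = (l2.filter (fun x => decide (x ∈ l1))).length := by
  apply List.Perm.length_eq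
  rw [List.perm_ext_iff_of_nodup (h1.filter _) (h2.filter _)]
  intro a; simp [List.mem_filter]; tauto

theorem count_eq (g : String) (K : List String) (hg : (g, K) ∈ genreKeywords)
    (S : List String) (hS : S.Nodup) :
    (S.countP (fun t => keywordToGenre.get? t == some g) : Int) =
      ((PySem.Set.inter (PySem.Set.ofList K) S).length : Int) := by
  have hcongr : S.countP (fun t => keywordToGenre.get? t == some g)
      = S.countP (fun t => decide (t ∈ K)) := by
    apply List.countP_congr
    intro t _
    rw [Bool.eq_iff_iff]
    simp [lookup_iff g K hg t]
  rw [hcongr]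
  have hKnd : (PySem.Set.ofList K).Nodup := PySem.Set.nodup_ofList K
  have hswap := filter_mem_comm S (PySem.Set.ofList K) hS hKnd
  rw [List.countP_eq_length_filter]
  congr 1
  calc (S.filter (fun t => decide (t ∈ K))).length
      = (S.filter (fun t => decide (t ∈ PySem.Set.ofList K))).length := by
        rw [show (S.filter (fun t => decide (t ∈ K))) = (S.filter (fun t => decide (t ∈ PySem.Set.ofList K))) from
          List.filter_congr (fun x _ => by rw [Bool.eq_iff_iff]; simp [PySem.Set.mem_ofList])]
    _ = ((PySem.Set.ofList K).filter (fun x => decide (x ∈ S))).length := hswap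
    _ = (PySem.Set.inter (PySem.Set.ofList K) S).length := by
        unfold PySem.Set.inter
        rw [show ((PySem.Set.ofList K).filter (fun x => decide (x ∈ S))) = ((PySem.Set.ofList K).filter (fun x => PySem.Set.contains S x)) from
          List.filter_congr (fun x _ => by rw [Bool.eq_iff_iff]; simp [PySem.Set.contains])]
set_option maxRecDepth 8192 in
theorem scores_eq (S : List String) (hS : S.Nodup) :
    (genreKeywords.foldl
        (fun d p => d.insert p.1 ((PySem.Set.inter (PySem.Set.ofList p.2) S).length : Int))
        PySem.Dict.empty)
      = S.foldl bStep (genreKeywords.foldl (fun d p => PySem.Dict.insert d p.1 (0 : Int)) PySem.Dict.empty) := by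
  have h0 : ∀ g ∈ keywordToGenre.values,
      g ∈ (genreKeywords.foldl (fun d p => PySem.Dict.insert d p.1 (0 : Int)) PySem.Dict.empty).keys := by decide
  obtain ⟨hk, hg⟩ := bFold_keys_getD S _ h0
  apply PySem.Dict.ext
  rw [show (genreKeywords.foldl
        (fun d p => d.insert p.1 ((PySem.Set.inter (PySem.Set.ofList p.2) S).length : Int))
        PySem.Dict.empty).items
      = [("Fiction", ((PySem.Set.inter (PySem.Set.ofList ["novel", "story", "thriller", "romance", "mystery", "narrative", "fantasy", "fiction"]) S).length : Int)),
     ("Non-Fiction", ((PySem.Set.inter (PySem.Set.ofList ["biography", "memoir", "self-help", "life", "true", "religion", "cooking", "sports", "travel", "body", "fitness", "relationships", "music", "criticism", "philosophy"]) S).length : Int)),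
     ("Academic", ((PySem.Set.inter (PySem.Set.ofList ["research", "study", "academic", "analysis", "paper", "theory", "history", "economics", "computers", "science", "education", "art", "medical", "psychology"]) S).length : Int)),
     ("Children's/Young Adult", ((PySem.Set.inter (PySem.Set.ofList ["children", "young", "teen", "kid", "juvenile"]) S).length : Int)),
     ("Poetry/Drama", ((PySem.Set.inter (PySem.Set.ofList ["poem", "poetry", "drama", "play", "verse"]) S).length : Int))] from rfl,
      PySem.Dict.items_eq_map_keys (List.foldl bStep (genreKeywords.foldl (fun d p => PySem.Dict.insert d p.1 (0 : Int)) PySem.Dict.empty) S) (by rw [hk]; decide) 0, hk,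
      show (genreKeywords.foldl (fun d p => PySem.Dict.insert d p.1 (0 : Int)) PySem.Dict.empty).keys
        = ["Fiction", "Non-Fiction", "Academic", "Children's/Young Adult", "Poetry/Drama"] by decide]
  simp only [List.map_cons, List.map_nil]
  rw [hg "Fiction"]
  rw [hg "Non-Fiction"]
  rw [hg "Academic"]
  rw [hg "Children's/Young Adult"]
  rw [hg "Poetry/Drama"]
  simp only [List.cons.injEq, Prod.mk.injEq, and_true, true_and]
  refine ⟨?_, ?_, ?_, ?_, ?_⟩
  · rw [show (genreKeywords.foldl (fun d p => PySem.Dict.insert d p.1 (0 : Int)) PySem.Dict.empty).getD "Fiction" 0 = (0 : Int) by decide,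
        ← count_eq "Fiction" ["novel", "story", "thriller", "romance", "mystery", "narrative", "fantasy", "fiction"] (by decide) S hS]
    omega
  · rw [show (genreKeywords.foldl (fun d p => PySem.Dict.insert d p.1 (0 : Int)) PySem.Dict.empty).getD "Non-Fiction" 0 = (0 : Int) by decide,
        ← count_eq "Non-Fiction" ["biography", "memoir", "self-help", "life", "true", "religion", "cooking", "sports", "travel", "body", "fitness", "relationships", "music", "criticism", "philosophy"] (by decide) S hS]
    omega
  · rw [show (genreKeywords.foldl (fun d p => PySem.Dict.insert d p.1 (0 : Int)) PySem.Dict.empty).getD "Academic" 0 = (0 : Int) by decide,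
        ← count_eq "Academic" ["research", "study", "academic", "analysis", "paper", "theory", "history", "economics", "computers", "science", "education", "art", "medical", "psychology"] (by decide) S hS]
    omega
  · rw [show (genreKeywords.foldl (fun d p => PySem.Dict.insert d p.1 (0 : Int)) PySem.Dict.empty).getD "Children's/Young Adult" 0 = (0 : Int) by decide,
        ← count_eq "Children's/Young Adult" ["children", "young", "teen", "kid", "juvenile"] (by decide) S hS]
    omega
  · rw [show (genreKeywords.foldl (fun d p => PySem.Dict.insert d p.1 (0 : Int)) PySem.Dict.empty).getD "Poetry/Drama" 0 = (0 : Int) by decide,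
        ← count_eq "Poetry/Drama" ["poem", "poetry", "drama", "play", "verse"] (by decide) S hS]
    omega

-- ===== VERDICT (by name: the statement is the Claim_ definition above) =====
set_option maxRecDepth 8192 in
theorem assign_genre_from_keywords_spec : Claim_equal_assign_genre_from_keywords := by
  intro text _
  unfold Spec_assign_genre_from_keywords
  simp only [assign_genre_from_keywords, assign_genre_from_keywords_alt, extractKeywords]
  have hS : (PySem.Set.ofList (PySem.Str.split₀ text)).Nodup := PySem.Set.nodup_ofList _
  simp only [show (fun d tok => match keywordToGenre.get? tok with
        | some g => PySem.Dict.modify d g 0 (· + 1)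
        | none => d) = bStep from rfl, scores_eq _ hS]
  have h0 : ∀ g ∈ keywordToGenre.values,
      g ∈ (genreKeywords.foldl (fun d p => PySem.Dict.insert d p.1 (0 : Int)) PySem.Dict.empty).keys := by decide
  obtain ⟨hk, -⟩ := bFold_keys_getD (PySem.Set.ofList (PySem.Str.split₀ text)) _ h0
  have hsize : (List.foldl bStep
      (genreKeywords.foldl (fun d p => PySem.Dict.insert d p.1 (0 : Int)) PySem.Dict.empty)
      (PySem.Set.ofList (PySem.Str.split₀ text))).size ≠ 0 := by
    have hlen := congrArg List.length hk
    simp only [PySem.Dict.keys, List.length_map] at hlen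
    simp only [PySem.Dict.size, hlen]
    decide
  rw [if_pos hsize]
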